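-- pv_equiv track=rewrite | github.com/leonlufkin/poker-bot | utils.py | get_straight_high
-- ===== SOURCE A (Python) =====
-- def get_straight_high(faces):
--     straight_high_max = -1
--     # accounting for ace high
--     if 0 in faces:
--         faces.append(13)
--     for shift in range(13):
--         faces_shifted = [f-shift for f in faces]
--         if set([0,1,2,3,4]) <= set(faces_shifted):
--             straight_high = 4+shift
--             if straight_high > straight_high_max:
--                 straight_high_max = straight_high
--     return straight_high_max
-- ===== SOURCE B (Python) =====
-- def get_straight_high(faces):
--     # same ace-high mutation as the original (observable to the caller)
--     if 0 in faces:
--         faces.append(13)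
--     s = set(faces)
--     best = -1
--     run = 0
--     for v in range(17):
--         if v in s:
--             run += 1
--         else:
--             run = 0
--         if run >= 5:
--             best = v
--     return best
-- ===== Notes on version B (the rewrite author's own statement) =====
-- stated objective: faster
-- what changed: Replaces A's 13 sliding-window passes (each building a shifted copy of the list and a subset test) by building one membership set and making a single ascending run-length scan that records the latest value ending a run of 5.
import Mathlib
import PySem

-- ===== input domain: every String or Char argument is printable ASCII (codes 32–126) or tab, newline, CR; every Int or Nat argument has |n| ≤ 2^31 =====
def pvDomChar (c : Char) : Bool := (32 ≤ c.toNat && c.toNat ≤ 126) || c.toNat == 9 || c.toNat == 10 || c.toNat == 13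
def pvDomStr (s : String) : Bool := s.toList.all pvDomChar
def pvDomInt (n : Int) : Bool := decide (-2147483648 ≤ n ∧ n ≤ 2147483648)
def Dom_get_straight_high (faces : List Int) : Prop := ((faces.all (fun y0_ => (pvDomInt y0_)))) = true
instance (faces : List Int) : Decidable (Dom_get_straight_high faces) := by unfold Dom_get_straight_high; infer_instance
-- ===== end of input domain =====

-- B replaces A's 13 sliding-window subset tests by one ascending run-length pass over a set;
-- return-value equivalence only: like A, B appends 13 to the caller's list when it contains 0 (same mutation).

-- ===== PORT A =====
def get_straight_high (faces : List Int) : Int :=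
  let faces := if (0 : Int) ∈ faces then faces ++ [13] else faces
  (PySem.List.pyRange 0 13 1).foldl (fun straight_high_max shift =>
    let faces_shifted := faces.map (fun f => f - shift)
    if PySem.Set.issubset (PySem.Set.ofList [0, 1, 2, 3, 4]) (PySem.Set.ofList faces_shifted) then
      let straight_high := 4 + shift
      if straight_high > straight_high_max then straight_high else straight_high_max
    else straight_high_max) (-1)

-- ===== PORT B =====
def get_straight_high_alt (faces : List Int) : Int :=
  let faces := if (0 : Int) ∈ faces then faces ++ [13] else faces
  let s := PySem.Set.ofList faces
  ((PySem.List.pyRange 0 17 1).foldl (fun (p : Int × Int) v =>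
      let run := if PySem.Set.contains s v then p.1 + 1 else 0
      (run, if run ≥ 5 then v else p.2)) (0, -1)).2

-- ===== PRECONDITION & SPEC =====
def Spec_get_straight_high (faces : List Int) (out : Int) : Prop := out = get_straight_high_alt faces
instance (faces : List Int) (out : Int) : Decidable (Spec_get_straight_high faces out) := by unfold Spec_get_straight_high; infer_instance

-- ===== CLAIM (what is proved, stated in full; the proofs are below) =====
def Claim_equal_get_straight_high : Prop := ∀ (faces : List Int), Dom_get_straight_high faces → Spec_get_straight_high faces (get_straight_high faces)

-- ===== LEMMAS AND PROOFS =====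

-- Qb g t : the five faces t-4 … t are all present (g is the membership test)
def Qb (g : Int → Bool) (t : Int) : Bool := g (t-4) && g (t-3) && g (t-2) && g (t-1) && g t

-- A's subset test at a shift is exactly Qb at top = shift + 4
lemma condA (F : List Int) (s : Int) :
    PySem.Set.issubset (PySem.Set.ofList [0, 1, 2, 3, 4]) (PySem.Set.ofList (F.map (fun f => f - s)))
      = Qb (fun i => decide (i ∈ F)) (s + 4) := by
  rw [Bool.eq_iff_iff, PySem.Set.issubset_iff]
  simp [Qb, PySem.Set.mem_ofList, List.mem_map, sub_eq_iff_eq_add]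
  ring_nf
  tauto

-- B's set-membership test is membership in the (mutated) faces list
lemma condB (F : List Int) (v : Int) :
    PySem.Set.contains (PySem.Set.ofList F) v = decide (v ∈ F) := by
  rw [Bool.eq_iff_iff]
  simp [PySem.Set.mem_ofList]

-- A's running-max test always fires: the candidate tops are strictly increasing along the scan
lemma foldA_mono (c : Int → Bool) : ∀ (n : Nat) (a b d : Int), (b - a).toNat = n → d < 4 + a →
    (PySem.List.pyRange a b 1).foldl
        (fun m s => if c s then (if 4 + s > m then 4 + s else m) else m) d
      = (PySem.List.pyRange a b 1).foldl (fun m s => if c s then s + 4 else m) d := by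
  intro n
  induction n with
  | zero => intro a b d h _; rw [PySem.List.pyRange_one_eq_nil (by omega)]; rfl
  | succ k ih =>
    intro a b d h hd
    rw [PySem.List.pyRange_one_cons (by omega)]
    simp only [List.foldl_cons]
    by_cases hc : c a
    · simp only [hc, if_pos]
      rw [if_pos (by omega)]
      have := ih (a+1) b (4+a) (by omega) (by omega)
      rw [this]
      congr 1; omega
    · simp only [hc, Bool.false_eq_true, if_false]
      exact ih (a+1) b d (by omega) (by omega)

-- reindex tops: fold over shifts [a,b) producing s+4 = fold over tops [a+4,b+4)
lemma foldA_reindex (c : Int → Bool) : ∀ (n : Nat) (a b d : Int), (b - a).toNat = n →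
    (PySem.List.pyRange a b 1).foldl (fun m s => if c (s + 4) then s + 4 else m) d
      = (PySem.List.pyRange (a + 4) (b + 4) 1).foldl (fun m v => if c v then v else m) d := by
  intro n
  induction n with
  | zero =>
    intro a b d h
    rw [PySem.List.pyRange_one_eq_nil (by omega), PySem.List.pyRange_one_eq_nil (by omega)]; rfl
  | succ k ih =>
    intro a b d h
    rw [PySem.List.pyRange_one_cons (by omega), PySem.List.pyRange_one_cons (a := a+4) (by omega)]
    simp only [List.foldl_cons]
    have := ih (a+1) b (if c (a + 4) then a + 4 else d) (by omega)
    rw [this]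
    congr 2; omega

-- invariant of B's run counter: before processing value a, k ≤ r iff the k values below a are present
def InvB (g : Int → Bool) (r a : Int) : Prop :=
  0 ≤ a ∧ 0 ≤ r ∧
  (1 ≤ r ↔ (1 ≤ a ∧ g (a-1) = true)) ∧
  (2 ≤ r ↔ (2 ≤ a ∧ g (a-1) = true ∧ g (a-2) = true)) ∧
  (3 ≤ r ↔ (3 ≤ a ∧ g (a-1) = true ∧ g (a-2) = true ∧ g (a-3) = true)) ∧
  (4 ≤ r ↔ (4 ≤ a ∧ g (a-1) = true ∧ g (a-2) = true ∧ g (a-3) = true ∧ g (a-4) = true))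

lemma InvB_step (g : Int → Bool) (r a : Int) (h : InvB g r a) :
    InvB g (if g a then r + 1 else 0) (a + 1) := by
  unfold InvB at h ⊢
  rw [show a + 1 - 1 = a by ring, show a + 1 - 2 = a - 1 by ring,
      show a + 1 - 3 = a - 2 by ring, show a + 1 - 4 = a - 3 by ring]
  by_cases hg : g a = true <;>
    by_cases h1 : g (a-1) = true <;>
    by_cases h2 : g (a-2) = true <;>
    by_cases h3 : g (a-3) = true <;>
      simp_all <;> omega

-- B's pair fold computes the "last top ≥ 4 with all five faces present" fold
lemma foldB (g : Int → Bool) : ∀ (n : Nat) (a b r m : Int), (b - a).toNat = n → InvB g r a →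
    ((PySem.List.pyRange a b 1).foldl
        (fun (p : Int × Int) v => let run := if g v then p.1 + 1 else 0
                                  (run, if run ≥ 5 then v else p.2)) (r, m)).2
      = (PySem.List.pyRange a b 1).foldl
          (fun m v => if decide (4 ≤ v) && Qb g v then v else m) m := by
  intro n
  induction n with
  | zero => intro a b r m h _; rw [PySem.List.pyRange_one_eq_nil (by omega)]; rfl
  | succ k ih =>
    intro a b r m h hinv
    rw [PySem.List.pyRange_one_cons (by omega)]
    simp only [List.foldl_cons]
    have hstep : ((if g a then r + 1 else 0), (if (if g a then r + 1 else 0) ≥ 5 then a else m))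
        = ((if g a then r + 1 else 0), (if decide (4 ≤ a) && Qb g a then a else m)) := by
      congr 1
      obtain ⟨ha, hr, i1, i2, i3, i4⟩ := hinv
      by_cases hg : g a = true
      · simp only [hg, if_pos, Qb]
        by_cases h5 : 5 ≤ r + 1
        · have h4r : 4 ≤ r := by omega
          obtain ⟨h4a, c1, c2, c3, c4⟩ := i4.mp h4r
          rw [if_pos (by omega), if_pos]
          simp [c1, c2, c3, c4, h4a]
        · rw [if_neg (by omega), if_neg]
          intro hcond
          simp only [Bool.and_eq_true, decide_eq_true_eq] at hcond
          have h4r : 4 ≤ r := i4.mpr ⟨hcond.1, by tauto, by tauto, by tauto, by tauto⟩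
          omega
      · simp only [hg, Bool.false_eq_true, if_false]
        rw [if_neg (by omega), if_neg]
        intro hcond
        simp only [Qb, Bool.and_eq_true, decide_eq_true_eq] at hcond
        exact hg (by tauto)
    show (List.foldl _ ((if g a then r + 1 else 0), (if (if g a then r + 1 else 0) ≥ 5 then a else m)) _).2 = _
    rw [hstep]
    exact ih (a+1) b _ _ (by omega) (InvB_step g r a hinv)

-- ===== VERDICT (by name: the statement is the Claim_ definition above) =====
theorem get_straight_high_spec : Claim_equal_get_straight_high := by
  intro faces _
  unfold Spec_get_straight_high get_straight_high get_straight_high_alt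
  set F := if (0 : Int) ∈ faces then faces ++ [13] else faces with hF
  set f : Int → Bool := fun i => decide (i ∈ F) with hf
  simp only [condA, condB, ← hf]
  rw [foldA_mono (fun s => Qb f (s + 4)) 13 0 13 (-1) rfl (by norm_num)]
  rw [foldA_reindex (Qb f) 13 0 13 (-1) rfl]
  rw [foldB f 17 0 17 0 (-1) rfl (by unfold InvB; norm_num)]
  rw [PySem.List.pyRange_one_append 0 4 17 (by norm_num) (by norm_num), List.foldl_append]
  have hpre : PySem.List.pyRange 0 4 1 = [0, 1, 2, 3] := by decide
  rw [hpre]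
  norm_num [List.foldl]
  apply PySem.List.foldl_congr_mem
  intro acc x hx
  rw [PySem.List.mem_pyRange_one] at hx
  simp [hx.1]
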